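-- pv_equiv track=rewrite | github.com/Erwan-BR/AdventOfCode | Solution_2015/Year2015_Solution.py | day_11_helper_doesStringContainsTwoPairs
-- ===== SOURCE A (Python) =====
-- def day_11_helper_doesStringContainsTwoPairs(stringToCheck: str) -> bool:
--     """
--     Helper for the solution for day 11. Check if the string contains 2 non-overlapping pair of letters.
--     https://adventofcode.com/2015/day/11
--
--     Returns:
--         Booleans that states if the string contains 2 non-overlapping pair of letters.
--
--     Args:
--         stringToCheck (str): String where we check if it contains 2 non-overlapping pair of letters.
--     """
--     charIndex:int = 1                   # Index of the char that we are looking at on the input string.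
--     numberOfPairOfLetters: int = 0      # Number of non-overlapping pair of characters.
--
--     # Iterate among all indexes
--     while charIndex < len(stringToCheck):
--         # If the char are the same, we increment the number of pairs of letters
--         if stringToCheck[charIndex] == stringToCheck[charIndex - 1]:
--             numberOfPairOfLetters += 1
--
--             # If we already have 2 non-overlapping pair, we can return True
--             if 2 == numberOfPairOfLetters:
--                 return True
--
--             # Increase by one the index to avoid considering 'aaa' as 2 pairs.
--             charIndex += 1
--
--         # Go to next index to check another pair.
--         charIndex += 1
--
--     # 2 non-overlapping pairs are not found in the string.
--     return False
-- ===== SOURCE B (Python) =====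
-- def day_11_helper_doesStringContainsTwoPairs(stringToCheck: str) -> bool:
--     # Different strategy: no greedy counting. Collect ALL adjacent-equal-pair start
--     # positions, then decide purely geometrically: two non-overlapping pairs exist
--     # iff the first and the last pair positions are at least 2 apart.
--     pairPositions = [i for i in range(len(stringToCheck) - 1)
--                      if stringToCheck[i] == stringToCheck[i + 1]]
--     return bool(pairPositions) and pairPositions[-1] - pairPositions[0] >= 2
-- ===== Notes on version B (the rewrite author's own statement) =====
-- stated objective: alternative
-- what changed: Replaced A's single greedy scan (count non-overlapping pairs, skip 2 after each, early return at 2) by a staged positional approach: first build the list of all adjacent-equal-pair start positions, then decide geometrically that two non-overlapping pairs exist iff the last pair position is at least 2 beyond the first.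
import Mathlib
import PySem

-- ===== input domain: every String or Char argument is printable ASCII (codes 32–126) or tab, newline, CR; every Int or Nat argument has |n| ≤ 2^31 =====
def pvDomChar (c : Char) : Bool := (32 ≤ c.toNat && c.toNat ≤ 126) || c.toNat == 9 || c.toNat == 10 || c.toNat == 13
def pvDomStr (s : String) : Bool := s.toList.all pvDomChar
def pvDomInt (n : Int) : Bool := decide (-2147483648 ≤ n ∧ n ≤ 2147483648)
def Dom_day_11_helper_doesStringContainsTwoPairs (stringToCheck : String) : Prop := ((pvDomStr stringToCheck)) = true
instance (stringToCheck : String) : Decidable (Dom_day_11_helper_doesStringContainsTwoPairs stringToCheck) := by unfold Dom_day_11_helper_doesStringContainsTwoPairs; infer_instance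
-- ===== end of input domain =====

-- B replaces A's greedy counting scan (skip 2 after each pair, early return at 2) by a staged
-- positional method: collect all adjacent-equal-pair start positions, then test geometrically
-- that the last position is at least 2 beyond the first.

-- ===== PORT A =====
-- while loop of A: charIndex-based scan; indices accessed are always in range (guard i < len,
-- and i-1 ≥ 0 since the loop starts at 1), so getD never hits its default.
def day11LoopA (cs : List Char) (i : Nat) (numberOfPairOfLetters : Nat) : Bool :=
  if i < cs.length then
    if cs.getD i ' ' == cs.getD (i - 1) ' ' then
      if 2 == numberOfPairOfLetters + 1 then true
      else day11LoopA cs (i + 2) (numberOfPairOfLetters + 1)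
    else day11LoopA cs (i + 1) numberOfPairOfLetters
  else false
termination_by cs.length - i

def day_11_helper_doesStringContainsTwoPairs (stringToCheck : String) : Bool :=
  day11LoopA stringToCheck.toList 1 0

-- ===== PORT B =====
-- list comprehension over range(len-1); s[i], s[i+1] are always in range there, so getD is exact
def day_11_helper_doesStringContainsTwoPairs_alt (stringToCheck : String) : Bool :=
  let cs := stringToCheck.toList
  let pairPositions := (List.range (cs.length - 1)).filter
    (fun i => cs.getD i ' ' == cs.getD (i + 1) ' ')
  !pairPositions.isEmpty &&
    decide ((2 : Int) ≤ ((pairPositions.getLast?.getD 0 : Nat) : Int)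
                        - ((pairPositions.head?.getD 0 : Nat) : Int))

-- ===== PRECONDITION & SPEC =====
def Spec_day_11_helper_doesStringContainsTwoPairs (stringToCheck : String) (out : Bool) : Prop := out = day_11_helper_doesStringContainsTwoPairs_alt stringToCheck
instance (stringToCheck : String) (out : Bool) : Decidable (Spec_day_11_helper_doesStringContainsTwoPairs stringToCheck out) := by unfold Spec_day_11_helper_doesStringContainsTwoPairs; infer_instance

-- ===== CLAIM (what is proved, stated in full; the proofs are below) =====
def Claim_equal_day_11_helper_doesStringContainsTwoPairs : Prop := ∀ (stringToCheck : String), Dom_day_11_helper_doesStringContainsTwoPairs stringToCheck → Spec_day_11_helper_doesStringContainsTwoPairs stringToCheck (day_11_helper_doesStringContainsTwoPairs stringToCheck)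

-- ===== LEMMAS AND PROOFS =====

-- number of non-overlapping adjacent equal pairs, greedy left to right (characterises A's count)
def day11Cnt : List Char → Nat
  | a :: b :: rest => if a == b then 1 + day11Cnt rest else day11Cnt (b :: rest)
  | _ => 0

theorem day11_drop_two (cs : List Char) (i : Nat) (h1 : 1 ≤ i) (h2 : i < cs.length) :
    cs.drop (i - 1) = cs.getD (i - 1) ' ' :: cs.getD i ' ' :: cs.drop (i + 1) := by
  have h1' : i - 1 < cs.length := by omega
  have hi : i - 1 + 1 = i := by omega
  rw [List.drop_eq_getElem_cons h1', hi, List.drop_eq_getElem_cons h2]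
  simp [List.getD_eq_getElem?_getD, h1', h2]

theorem day11_loopA_cnt (cs : List Char) (i np : Nat) (h1 : 1 ≤ i) (hnp : np ≤ 1) :
    day11LoopA cs i np = decide (2 ≤ np + day11Cnt (cs.drop (i - 1))) := by
  by_cases h2 : i < cs.length
  · rw [day11_drop_two cs i h1 h2]
    by_cases heq : cs.getD i ' ' = cs.getD (i - 1) ' '
    · have hb : (cs.getD i ' ' == cs.getD (i - 1) ' ') = true := beq_iff_eq.mpr heq
      have hb' : (cs.getD (i - 1) ' ' == cs.getD i ' ') = true := beq_iff_eq.mpr heq.symm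
      rw [day11LoopA]
      simp only [if_pos h2, hb, if_true]
      rw [show day11Cnt (cs.getD (i - 1) ' ' :: cs.getD i ' ' :: cs.drop (i + 1))
            = 1 + day11Cnt (cs.drop (i + 1)) by simp only [day11Cnt, hb', if_true]]
      by_cases hnp2 : 2 = np + 1
      · have hB : ((2 : Nat) == np + 1) = true := beq_iff_eq.mpr hnp2
        simp only [hB]
        rw [if_pos trivial]
        exact (decide_eq_true (by omega)).symm
      · have hB : ((2 : Nat) == np + 1) = false := beq_eq_false_iff_ne.mpr hnp2
        simp only [hB, Bool.false_eq_true, if_false]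
        rw [day11_loopA_cnt cs (i + 2) (np + 1) (by omega) (by omega)]
        rw [show i + 2 - 1 = i + 1 by omega]
        congr 1
        simp only [eq_iff_iff]
        omega
    · have hb : (cs.getD i ' ' == cs.getD (i - 1) ' ') = false := beq_eq_false_iff_ne.mpr heq
      have hb' : (cs.getD (i - 1) ' ' == cs.getD i ' ') = false :=
        beq_eq_false_iff_ne.mpr (Ne.symm heq)
      rw [day11LoopA]
      simp only [if_pos h2, hb, Bool.false_eq_true, if_false]
      rw [day11_loopA_cnt cs (i + 1) np (by omega) hnp]
      rw [show i + 1 - 1 = i by omega]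
      rw [show day11Cnt (cs.getD (i - 1) ' ' :: cs.getD i ' ' :: cs.drop (i + 1))
            = day11Cnt (cs.getD i ' ' :: cs.drop (i + 1)) by
              simp only [day11Cnt, hb', Bool.false_eq_true, if_false]]
      congr 1
      rw [List.drop_eq_getElem_cons h2]
      simp [List.getD_eq_getElem?_getD, h2]
  · rw [day11LoopA]
    simp only [if_neg h2]
    have hlen : (cs.drop (i - 1)).length ≤ 1 := by
      simp only [List.length_drop]; omega
    have hc : day11Cnt (cs.drop (i - 1)) = 0 := by
      match hm : cs.drop (i - 1) with
      | [] => simp [day11Cnt]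
      | [a] => simp [day11Cnt]
      | a :: b :: r => rw [hm] at hlen; simp at hlen
    rw [hc]
    exact (decide_eq_false (by omega : ¬ (2 ≤ np + 0))).symm
termination_by cs.length - i

-- "position i starts an adjacent equal pair"
def day11PairAt (cs : List Char) (i : Nat) : Prop :=
  i + 1 < cs.length ∧ cs.getD i ' ' = cs.getD (i + 1) ' '

theorem day11PairAt_cons (a : Char) (cs : List Char) (i : Nat) :
    day11PairAt (a :: cs) (i + 1) ↔ day11PairAt cs i := by
  simp [day11PairAt]

theorem day11PairAt_cons2_head (a b : Char) (cs : List Char) :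
    day11PairAt (a :: b :: cs) 0 ↔ a = b := by
  simp [day11PairAt]

-- greedy count is positive iff some pair exists
theorem day11_cnt_pos (l : List Char) : 1 ≤ day11Cnt l ↔ ∃ i, day11PairAt l i := by
  induction l using day11Cnt.induct with
  | case1 a b rest hab ih =>
    simp only [day11Cnt, hab, if_true]
    constructor
    · intro _; exact ⟨0, (day11PairAt_cons2_head a b rest).mpr (beq_iff_eq.mp hab)⟩
    · intro _; omega
  | case2 a b rest hab ih =>
    simp only [day11Cnt, hab, Bool.false_eq_true, if_false]
    rw [ih]
    constructor
    · rintro ⟨i, hi⟩; exact ⟨i + 1, (day11PairAt_cons a _ _).mpr hi⟩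
    · rintro ⟨i, hi⟩
      match i with
      | 0 => exact absurd ((day11PairAt_cons2_head a b rest).mp hi) (by simpa using hab)
      | i + 1 => exact ⟨i, (day11PairAt_cons a _ _).mp hi⟩
  | case3 l h =>
    match l with
    | [] => simp [day11Cnt, day11PairAt]
    | [a] => simp [day11Cnt, day11PairAt]
    | a :: b :: r => exact (h a b r rfl).elim

-- greedy count reaches 2 iff two pairs at distance ≥ 2 exist
theorem day11_cnt_two (l : List Char) :
    2 ≤ day11Cnt l ↔ ∃ i j, i + 2 ≤ j ∧ day11PairAt l i ∧ day11PairAt l j := by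
  induction l using day11Cnt.induct with
  | case1 a b rest hab ih =>
    simp only [day11Cnt, hab, if_true]
    constructor
    · intro h
      have : 1 ≤ day11Cnt rest := by omega
      obtain ⟨j, hj⟩ := (day11_cnt_pos rest).mp this
      exact ⟨0, j + 2, by omega,
        (day11PairAt_cons2_head a b rest).mpr (beq_iff_eq.mp hab),
        (day11PairAt_cons a _ _).mpr ((day11PairAt_cons b _ _).mpr hj)⟩
    · rintro ⟨i, j, hij, hi, hj⟩
      have h2 : 2 ≤ j := by omega
      have : day11PairAt rest (j - 2) := by
        have := hj
        match j, h2 with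
        | j + 2, _ =>
          simpa using ((day11PairAt_cons b _ _).mp ((day11PairAt_cons a _ _).mp this))
      have := (day11_cnt_pos rest).mpr ⟨j - 2, this⟩
      omega
  | case2 a b rest hab ih =>
    simp only [day11Cnt, hab, Bool.false_eq_true, if_false]
    rw [ih]
    constructor
    · rintro ⟨i, j, hij, hi, hj⟩
      exact ⟨i + 1, j + 1, by omega, (day11PairAt_cons a _ _).mpr hi,
        (day11PairAt_cons a _ _).mpr hj⟩
    · rintro ⟨i, j, hij, hi, hj⟩
      match i with
      | 0 => exact absurd ((day11PairAt_cons2_head a b rest).mp hi) (by simpa using hab)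
      | i + 1 =>
        match j, (by omega : 1 ≤ j) with
        | j + 1, _ =>
          exact ⟨i, j, by omega, (day11PairAt_cons a _ _).mp hi, (day11PairAt_cons a _ _).mp hj⟩
  | case3 l h =>
    match l with
    | [] => simp [day11Cnt, day11PairAt]
    | [a] => simp [day11Cnt, day11PairAt]
    | a :: b :: r => exact (h a b r rfl).elim

-- in a strictly increasing list, every element is ≤ the last
theorem day11_le_getLast {l : List Nat} (hs : l.Pairwise (· < ·)) {x : Nat}
    (hx : x ∈ l) (hne : l ≠ []) : x ≤ l.getLast hne := by
  induction l with
  | nil => exact absurd rfl hne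
  | cons a t ih =>
    match t with
    | [] => simp at hx; simp [hx, List.getLast]
    | b :: t' =>
      rw [List.getLast_cons (by simp)]
      rcases List.mem_cons.mp hx with h | h
      · subst h
        have hl := (List.pairwise_cons.mp hs).1 _ (List.getLast_mem (l := b :: t') (by simp))
        omega
      · exact ih (List.pairwise_cons.mp hs).2 h (by simp)

-- membership in B's pair-position list is exactly day11PairAt
theorem day11_mem_P (cs : List Char) (i : Nat) :
    i ∈ (List.range (cs.length - 1)).filter
        (fun i => cs.getD i ' ' == cs.getD (i + 1) ' ') ↔ day11PairAt cs i := by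
  simp only [List.mem_filter, List.mem_range, beq_iff_eq, day11PairAt]
  constructor
  · rintro ⟨h1, h2⟩; exact ⟨by omega, h2⟩
  · rintro ⟨h1, h2⟩; exact ⟨by omega, h2⟩

theorem day11_P_sorted (cs : List Char) :
    ((List.range (cs.length - 1)).filter
        (fun i => cs.getD i ' ' == cs.getD (i + 1) ' ')).Pairwise (· < ·) :=
  (List.pairwise_lt_range).filter _

-- B's geometric test on any sorted list of exactly the pair positions matches the greedy count
theorem day11_B_eq (cs : List Char) (P : List Nat)
    (hmem : ∀ i, i ∈ P ↔ day11PairAt cs i) (hs : P.Pairwise (· < ·)) :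
    decide (2 ≤ day11Cnt cs)
      = (!P.isEmpty && decide ((2 : Int) ≤ ((P.getLast?.getD 0 : Nat) : Int)
                                - ((P.head?.getD 0 : Nat) : Int))) := by
  match P, hmem, hs with
  | [], hmem, _ =>
    have : ¬ (2 ≤ day11Cnt cs) := by
      intro h
      obtain ⟨i, _, _, hi, _⟩ := (day11_cnt_two cs).mp h
      simpa using (hmem i).mpr hi
    simp [this]
  | h :: t, hmem, hsorted =>
    have hLne : (h :: t) ≠ [] := by simp
    set L := (h :: t).getLast hLne with hLdef
    have hLmem : L ∈ h :: t := List.getLast_mem hLne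
    have hmemL : day11PairAt cs L := (hmem L).mp hLmem
    have hmemH : day11PairAt cs h := (hmem h).mp (by simp)
    have hiff : (2 ≤ day11Cnt cs) ↔ ((2 : Int) ≤ (L : Int) - (h : Int)) := by
      rw [day11_cnt_two]
      constructor
      · rintro ⟨i, j, hij, hi, hj⟩
        have h1 : h ≤ i := by
          rcases List.mem_cons.mp ((hmem i).mpr hi) with h' | h'
          · omega
          · exact Nat.le_of_lt ((List.pairwise_cons.mp hsorted).1 _ h')
        have h2 : j ≤ L := day11_le_getLast hsorted ((hmem j).mpr hj) hLne
        omega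
      · intro hd
        refine ⟨h, L, by omega, hmemH, hmemL⟩
    have hlast? : (h :: t).getLast? = some L := List.getLast?_eq_some_getLast hLne
    simp only [List.isEmpty_cons, Bool.not_false, Bool.true_and, hlast?, List.head?_cons,
      Option.getD_some]
    exact decide_eq_decide.mpr hiff

-- ===== VERDICT (by name: the statement is the Claim_ definition above) =====
theorem day_11_helper_doesStringContainsTwoPairs_spec : Claim_equal_day_11_helper_doesStringContainsTwoPairs := by
  intro s _
  unfold Spec_day_11_helper_doesStringContainsTwoPairs
  unfold day_11_helper_doesStringContainsTwoPairs day_11_helper_doesStringContainsTwoPairs_alt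
  rw [day11_loopA_cnt s.toList 1 0 (by omega) (by omega)]
  simp only [Nat.zero_add, Nat.sub_self, List.drop_zero]
  exact day11_B_eq s.toList _ (day11_mem_P s.toList) (day11_P_sorted s.toList)
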